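-- pv_equiv track=rewrite | github.com/FelipeButhay/Tetris-bot | TETRIS2_bot.py | score_rc
-- ===== SOURCE A (Python) =====
-- def score_rc(layed):
--     rows = [[False for y in range(0,10)] for x in range(0, 20)]
--     rows_counter = [0 for x in range(0, 20)]
--     for x, y in layed:
--         rows[int(y)][int(x)] = True
--
--     for yy, y in enumerate(rows):
--         for x in y:
--             if x:
--                 rows_counter[yy] += 1
--
--     for x in rows_counter[:]:
--         rows_counter[rows_counter.index(x)] = 10 - rows_counter[rows_counter.index(x)]
--
--     for x in rows_counter[:]:
--         if x == 10:
--             rows_counter.remove(x)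
--         else:
--             rows_counter[rows_counter.index(x)] **= 2
--
--     return sum(rows_counter)
-- ===== SOURCE B (Python) =====
-- def score_rc(layed):
--     rows = [[False for y in range(0, 10)] for x in range(0, 20)]
--     for x, y in layed:
--         rows[int(y)][int(x)] = True
--     total = 0
--     for row in rows:
--         c = sum(row)
--         if c != 0:
--             total += (10 - c) ** 2
--     return total
-- ===== Notes on version B (the rewrite author's own statement) =====
-- stated objective: simpler
-- what changed: After painting the grid identically, B replaces the counter list and A's three mutation passes (flip via .index, remove 10s, square via .index) by one direct pass that adds (10-c)**2 for each row with a nonzero count c.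
import Mathlib
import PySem

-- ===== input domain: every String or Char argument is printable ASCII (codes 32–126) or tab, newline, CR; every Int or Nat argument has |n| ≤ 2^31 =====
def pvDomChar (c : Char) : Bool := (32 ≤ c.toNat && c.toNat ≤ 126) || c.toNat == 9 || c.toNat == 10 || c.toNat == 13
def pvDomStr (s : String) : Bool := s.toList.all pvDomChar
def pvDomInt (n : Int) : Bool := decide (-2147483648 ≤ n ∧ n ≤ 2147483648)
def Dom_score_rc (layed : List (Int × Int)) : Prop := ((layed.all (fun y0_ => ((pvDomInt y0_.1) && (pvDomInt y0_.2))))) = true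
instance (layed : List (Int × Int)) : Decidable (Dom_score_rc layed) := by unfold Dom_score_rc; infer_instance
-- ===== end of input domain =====

-- B replaces A's counter list and its three .index/.remove mutation passes by one direct
-- per-row reduction adding (10-c)^2 for each row with nonzero count c (objective: simpler).

-- ===== PORT A =====

-- first loop of both Pythons (identical source text in A and B):
-- 'for x, y in layed: rows[int(y)][int(x)] = True'
def pvPaint (layed : List (Int × Int)) (rows : List (List Bool)) : List (List Bool) :=
  layed.foldl (fun rows p =>
    PySem.List.pySetD rows p.2 (PySem.List.pySetD (PySem.List.pyGetD rows p.2 []) p.1 true)) rows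

-- 'for x in y: if x: rows_counter[yy] += 1'  (yy comes from enumerate, hence ≥ 0)
def pvCount1 (cnt : List Int) (yy : Int) (row : List Bool) : List Int :=
  row.foldl (fun cnt x =>
    if x then PySem.List.pySetD cnt yy (PySem.List.pyGetD cnt yy 0 + 1) else cnt) cnt

-- 'for x in rows_counter[:]: rows_counter[rows_counter.index(x)] = 10 - rows_counter[rows_counter.index(x)]'
-- (.index never raises here, x is always present — proved below; the none branch is unreachable)
def pvPass3 (todo l : List Int) : List Int :=
  todo.foldl (fun l x =>
    match PySem.List.index? l x with
    | some i => l.set i (10 - l.getD i 0)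
    | none => l) l

-- 'for x in rows_counter[:]: if x == 10: rows_counter.remove(x) else: rows_counter[rows_counter.index(x)] **= 2'
-- (.remove / .index never raise here — proved below; the none branches are unreachable)
def pvPass4 (todo l : List Int) : List Int :=
  todo.foldl (fun l x =>
    if x == 10 then (PySem.List.remove? l x).getD l
    else
      match PySem.List.index? l x with
      | some i => l.set i (l.getD i 0 ^ 2)
      | none => l) l

def score_rc (layed : List (Int × Int)) : Int :=
  let rows := pvPaint layed
    ((PySem.List.pyRange 0 20 1).map (fun _ => (PySem.List.pyRange 0 10 1).map (fun _ => false)))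
  let cnt0 := (PySem.List.pyRange 0 20 1).map (fun _ => (0 : Int))
  let cnt := (PySem.List.enumerate rows).foldl (fun c p => pvCount1 c p.1 p.2) cnt0
  let c1 := pvPass3 cnt cnt
  let c2 := pvPass4 c1 c1
  c2.sum

-- ===== PORT B =====

-- 'c = sum(row)' on a row of booleans
def pvRowSum (row : List Bool) : Int := (row.map (fun x => if x then (1 : Int) else 0)).sum

def score_rc_alt (layed : List (Int × Int)) : Int :=
  let rows := pvPaint layed
    ((PySem.List.pyRange 0 20 1).map (fun _ => (PySem.List.pyRange 0 10 1).map (fun _ => false)))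
  -- 'c = sum(row); if c != 0: total += (10 - c) ** 2'  (c inlined)
  rows.foldl (fun total row =>
    if pvRowSum row ≠ 0 then total + (10 - pvRowSum row) ^ 2 else total) 0

-- ===== PRECONDITION & SPEC =====
-- A raises IndexError when some (x, y) has y outside [-20, 19] or x outside [-10, 9]; B raises there too.
def Pre_score_rc (layed : List (Int × Int)) : Prop :=
  ∀ p ∈ layed, PySem.Raise.InRange 20 p.2 ∧ PySem.Raise.InRange 10 p.1
instance (layed : List (Int × Int)) : Decidable (Pre_score_rc layed) := by
  unfold Pre_score_rc; infer_instance
def pvWitness_score_rc : (List (Int × Int)) := [(0, 0), (-1, 19), (9, -20), (3, 5)]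

def Spec_score_rc (layed : List (Int × Int)) (out : Int) : Prop := out = score_rc_alt layed
instance (layed : List (Int × Int)) (out : Int) : Decidable (Spec_score_rc layed out) := by
  unfold Spec_score_rc; infer_instance

-- ===== CLAIM (what is proved, stated in full; the proofs are below) =====
def Claim_equal_score_rc : Prop := ∀ (layed : List (Int × Int)), Dom_score_rc layed → Pre_score_rc layed → Spec_score_rc layed (score_rc layed)

-- ===== LEMMAS AND PROOFS =====

-- setting an element whose value is known, as a sum and as a multiset
theorem pvSetSum (l : List Int) (i : Nat) (v x : Int) (hi : i < l.length) (hx : l[i] = x) :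
    (l.set i v).sum = l.sum - x + v := by
  subst hx
  have h2 : (List.take i l).sum + (List.drop i l).sum = l.sum := List.sum_take_add_sum_drop l i
  rw [List.sum_set]
  simp [hi]
  omega

theorem pvCoeApp (t d : List Int) (a : Int) :
    ((t ++ a :: d : List Int) : Multiset Int) = ↑t + ({a} + ↑d) := by
  rw [← Multiset.coe_add, ← Multiset.cons_coe, ← Multiset.singleton_add]

theorem pvSetMs (l : List Int) (i : Nat) (v x : Int) (hi : i < l.length) (hx : l[i] = x) :
    ((l.set i v : List Int) : Multiset Int) + {x} = (l : Multiset Int) + {v} := by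
  subst hx
  rw [List.set_eq_take_append_cons_drop, if_pos hi]
  conv_rhs => rw [← List.take_append_drop i l, ← List.getElem_cons_drop (as := l) (h := hi)]
  rw [pvCoeApp, pvCoeApp]
  abel

-- the tail of the worklist still fits in the updated list
theorem pvCountSetEq (l : List Int) (i : Nat) (v x a : Int) (hi : i < l.length) (hx : l[i] = x) :
    (l.set i v).count a + (if a = x then 1 else 0)
      = l.count a + (if a = v then 1 else 0) := by
  have hc := congrArg (Multiset.count a) (pvSetMs l i v x hi hx)
  rw [Multiset.count_add, Multiset.count_add, Multiset.count_singleton,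
    Multiset.count_singleton, Multiset.coe_count, Multiset.coe_count] at hc
  exact hc

theorem pvRestLe (l rest : List Int) (x v : Int) (i : Nat) (hi : i < l.length) (hx : l[i] = x)
    (h : ((x :: rest : List Int) : Multiset Int) ≤ ↑l) :
    ((rest : List Int) : Multiset Int) ≤ ↑(l.set i v) := by
  rw [Multiset.le_iff_count] at h ⊢
  intro a
  have h1 := h a
  have h2 := pvCountSetEq l i v x a hi hx
  rw [Multiset.coe_count, Multiset.coe_count, List.count_cons] at h1
  rw [Multiset.coe_count, Multiset.coe_count]
  have h1' : rest.count a + (if x = a then 1 else 0) ≤ l.count a := by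
    simpa [beq_iff_eq] using h1
  by_cases hax : a = x
  · rw [if_pos hax.symm] at h1'
    rw [if_pos hax] at h2
    by_cases hav : a = v
    · rw [if_pos hav] at h2; omega
    · rw [if_neg hav] at h2; omega
  · rw [if_neg (Ne.symm hax)] at h1'
    rw [if_neg hax] at h2
    by_cases hav : a = v
    · rw [if_pos hav] at h2; omega
    · rw [if_neg hav] at h2; omega

theorem pvRestLeErase (l rest : List Int) (x : Int)
    (h : ((x :: rest : List Int) : Multiset Int) ≤ ↑l) :
    ((rest : List Int) : Multiset Int) ≤ ↑(l.erase x) := by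
  rw [Multiset.le_iff_count] at h ⊢
  intro a
  have h1 := h a
  simp only [Multiset.coe_count, List.count_cons] at h1 ⊢
  by_cases hax : a = x <;>
    simp [hax, List.count_erase_self, List.count_erase_of_ne] at h1 ⊢ <;> omega

theorem pvHeadMem (l rest : List Int) (x : Int)
    (h : ((x :: rest : List Int) : Multiset Int) ≤ ↑l) : x ∈ l := by
  rw [← Multiset.cons_coe] at h
  exact Multiset.mem_coe.mp (Multiset.mem_of_le h (Multiset.mem_cons_self x ↑rest))

-- pass 3 maps the multiset of counters through (10 - ·)
theorem pvPass3_ms (todo : List Int) : ∀ (l : List Int), ((todo : List Int) : Multiset Int) ≤ ↑l →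
    ((pvPass3 todo l : List Int) : Multiset Int) + ↑todo
      = ↑l + ↑(todo.map (fun t => 10 - t)) := by
  induction todo with
  | nil => intro l _; simp [pvPass3]
  | cons x rest ih =>
    intro l h
    have hxl : x ∈ l := pvHeadMem l rest x h
    obtain ⟨i, hidx⟩ : ∃ i, PySem.List.index? l x = some i := by
      have := (PySem.List.index?_isSome_iff l x).mpr hxl
      exact Option.isSome_iff_exists.mp this
    obtain ⟨hi, hix, -⟩ := PySem.List.getElem_of_index?_eq_some hidx
    have hidx' : List.idxOf? x l = some i := by
      rw [← PySem.List.index?_eq_idxOf?]; exact hidx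
    have hstep : pvPass3 (x :: rest) l = pvPass3 rest (l.set i (10 - x)) := by
      simp [pvPass3, hidx', List.getElem?_eq_getElem hi, hix]
    have hle' := pvRestLe l rest x (10 - x) i hi hix h
    have hIH := ih (l.set i (10 - x)) hle'
    have hkey := pvSetMs l i (10 - x) x hi hix
    rw [hstep, List.map_cons]
    rw [← Multiset.cons_coe, ← Multiset.cons_coe, ← Multiset.singleton_add,
        ← Multiset.singleton_add]
    calc ↑(pvPass3 rest (l.set i (10 - x))) + ({x} + (↑rest : Multiset Int))
        = (↑(pvPass3 rest (l.set i (10 - x))) + ↑rest) + {x} := by abel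
      _ = (↑(l.set i (10 - x)) + (↑(rest.map (fun t => 10 - t)) : Multiset Int)) + {x} := by
            rw [hIH]
      _ = (↑(l.set i (10 - x)) + {x}) + (↑(rest.map (fun t => 10 - t)) : Multiset Int) := by abel
      _ = (↑l + {10 - x}) + (↑(rest.map (fun t => 10 - t)) : Multiset Int) := by rw [hkey]
      _ = ↑l + ({10 - x} + (↑(rest.map (fun t => 10 - t)) : Multiset Int)) := by abel

-- pass 4's net effect on the sum
theorem pvPass4_sum (todo : List Int) : ∀ (l : List Int), ((todo : List Int) : Multiset Int) ≤ ↑l →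
    (pvPass4 todo l).sum
      = l.sum + (todo.map (fun t => if t == 10 then (-10 : Int) else t ^ 2 - t)).sum := by
  induction todo with
  | nil => intro l _; simp [pvPass4]
  | cons x rest ih =>
    intro l h
    have hxl : x ∈ l := pvHeadMem l rest x h
    by_cases hx10 : x = 10
    · subst hx10
      have hstep : pvPass4 (10 :: rest) l = pvPass4 rest (l.erase 10) := by
        simp [pvPass4, PySem.List.remove?_eq_some_erase l 10 hxl]
      have hsum : (10 : Int) + (l.erase 10).sum = l.sum :=
        ((List.perm_cons_erase hxl).sum_eq).symm
      have hIH := ih (l.erase 10) (pvRestLeErase l rest 10 h)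
      rw [hstep, hIH, List.map_cons]
      simp only [List.sum_cons, beq_self_eq_true, if_true]
      linarith
    · obtain ⟨i, hidx⟩ : ∃ i, PySem.List.index? l x = some i := by
        have := (PySem.List.index?_isSome_iff l x).mpr hxl
        exact Option.isSome_iff_exists.mp this
      obtain ⟨hi, hix, -⟩ := PySem.List.getElem_of_index?_eq_some hidx
      have hidx' : List.idxOf? x l = some i := by
        rw [← PySem.List.index?_eq_idxOf?]; exact hidx
      have hstep : pvPass4 (x :: rest) l = pvPass4 rest (l.set i (x ^ 2)) := by
        simp [pvPass4, hidx', hx10, List.getElem?_eq_getElem hi, hix]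
      have hIH := ih (l.set i (x ^ 2)) (pvRestLe l rest x (x ^ 2) i hi hix h)
      have hsum := pvSetSum l i (x ^ 2) x hi hix
      rw [hstep, hIH, hsum, List.map_cons]
      simp only [List.sum_cons, beq_iff_eq, hx10, if_false]
      linarith

-- folding the per-element deltas of pass 4 back into one map
theorem pvSumBridge (l : List Int) :
    l.sum + (l.map (fun t => if t == 10 then (-10 : Int) else t ^ 2 - t)).sum
      = (l.map (fun t => if t == 10 then (0 : Int) else t ^ 2)).sum := by
  induction l with
  | nil => simp
  | cons a l ih =>
    simp only [List.map_cons, List.sum_cons]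
    rw [← ih]
    by_cases ha : a = 10 <;> simp [ha] <;> ring

-- a mapped sum only depends on the multiset of the list
theorem pvSumOfMs (l m : List Int) (hm : (l : Multiset Int) = ↑m) (f : Int → Int) :
    (l.map f).sum = (m.map f).sum := by
  have h : (Multiset.map f ↑l).sum = (Multiset.map f (↑m : Multiset Int)).sum := by rw [hm]
  simpa [Multiset.map_coe, Multiset.sum_coe] using h

-- an index accepted by pyIdx? is in range
theorem pvIdxLt (n : Nat) (i : Int) (k : Nat) (h : PySem.List.pyIdx? n i = some k) : k < n := by
  unfold PySem.List.pyIdx? at h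
  split_ifs at h <;> simp at h <;> omega

-- the painting loop keeps the 20 × 10 shape
theorem pvPaintStep_mem (rows : List (List Bool)) (p : Int × Int)
    (h : ∀ r ∈ rows, r.length = 10) :
    ∀ r ∈ PySem.List.pySetD rows p.2
        (PySem.List.pySetD (PySem.List.pyGetD rows p.2 []) p.1 true), r.length = 10 := by
  intro r hr
  cases hk : PySem.List.pyIdx? rows.length p.2 with
  | none =>
    have hid : PySem.List.pySetD rows p.2
        (PySem.List.pySetD (PySem.List.pyGetD rows p.2 []) p.1 true) = rows := by
      unfold PySem.List.pySetD PySem.List.pySet?; rw [hk]; rfl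
    rw [hid] at hr; exact h r hr
  | some k =>
    have hklt := pvIdxLt rows.length p.2 k hk
    have hset : PySem.List.pySetD rows p.2
        (PySem.List.pySetD (PySem.List.pyGetD rows p.2 []) p.1 true)
        = rows.set k (PySem.List.pySetD (PySem.List.pyGetD rows p.2 []) p.1 true) := by
      unfold PySem.List.pySetD PySem.List.pySet?; rw [hk]; rfl
    rw [hset] at hr
    rcases List.mem_or_eq_of_mem_set hr with h' | h'
    · exact h r h'
    · have hget : PySem.List.pyGetD rows p.2 [] = rows[k] := by
        unfold PySem.List.pyGetD PySem.List.pyGet?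
        rw [hk]
        simp [List.getElem?_eq_getElem hklt]
      rw [h', PySem.List.length_pySetD, hget]
      exact h rows[k] (List.getElem_mem hklt)

theorem pvPaint_shape (layed : List (Int × Int)) : ∀ (rows : List (List Bool)),
    (∀ r ∈ rows, r.length = 10) →
    (pvPaint layed rows).length = rows.length ∧ ∀ r ∈ pvPaint layed rows, r.length = 10 := by
  induction layed with
  | nil => intro rows h; exact ⟨rfl, h⟩
  | cons p rest ih =>
    intro rows h
    have hstep : pvPaint (p :: rest) rows
        = pvPaint rest (PySem.List.pySetD rows p.2
            (PySem.List.pySetD (PySem.List.pyGetD rows p.2 []) p.1 true)) := rfl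
    rw [hstep]
    obtain ⟨h1, h2⟩ := ih _ (pvPaintStep_mem rows p h)
    exact ⟨h1.trans (PySem.List.length_pySetD rows p.2 _), h2⟩

-- the inner counting loop adds the row's count at position pre.length
theorem pvCount1_eq (row : List Bool) : ∀ (pre t : List Int) (a : Int),
    pvCount1 (pre ++ a :: t) (pre.length : Int) row = pre ++ (a + pvRowSum row) :: t := by
  induction row with
  | nil => intro pre t a; simp [pvCount1, pvRowSum]
  | cons x xs ih =>
    intro pre t a
    cases x with
    | false =>
      have hstep : pvCount1 (pre ++ a :: t) (pre.length : Int) (false :: xs)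
          = pvCount1 (pre ++ a :: t) (pre.length : Int) xs := rfl
      rw [hstep, ih]
      simp [pvRowSum]
    | true =>
      have hget : PySem.List.pyGetD (pre ++ a :: t) ((pre.length : Nat) : Int) 0 = a := by
        rw [PySem.List.pyGetD_natCast]
        simp [List.getD_eq_getElem?_getD]
      have hset : (pre ++ a :: t).set pre.length (a + 1) = pre ++ (a + 1) :: t := by
        rw [List.set_append_right _ _ (Nat.le_refl pre.length)]
        simp
      have hstep : pvCount1 (pre ++ a :: t) (pre.length : Int) (true :: xs)
          = pvCount1 (pre ++ (a + 1) :: t) (pre.length : Int) xs := by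
        simp only [pvCount1, List.foldl_cons, if_true]
        rw [PySem.List.pyGetD_natCast] at *
        simp only [PySem.List.pySetD_natCast]
        rw [show (pre ++ a :: t).getD pre.length 0 = a by
          simp [List.getD_eq_getElem?_getD],
          hset]
      rw [hstep, ih]
      have : a + 1 + pvRowSum xs = a + pvRowSum (true :: xs) := by
        simp [pvRowSum]; ring
      rw [this]

-- the whole counting loop produces the per-row counts
theorem pvCountAll (rows : List (List Bool)) : ∀ (pre : List Int),
    (PySem.List.enumerate rows (pre.length : Int)).foldl (fun c p => pvCount1 c p.1 p.2)
        (pre ++ List.replicate rows.length 0)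
      = pre ++ rows.map pvRowSum := by
  induction rows with
  | nil => intro pre; simp [PySem.List.enumerate]
  | cons row rest ih =>
    intro pre
    rw [PySem.List.enumerate_cons]
    simp only [List.foldl_cons, List.length_cons, List.replicate_succ]
    rw [pvCount1_eq row pre (List.replicate rest.length 0) 0, zero_add]
    have hpre : pre ++ pvRowSum row :: List.replicate rest.length 0
        = (pre ++ [pvRowSum row]) ++ List.replicate rest.length 0 := by simp
    have hlen : ((pre.length : Int) + 1) = (((pre ++ [pvRowSum row]).length : Nat) : Int) := by
      simp
    rw [hpre, hlen, ih (pre ++ [pvRowSum row])]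
    simp

-- B's fold is the sum of per-row contributions
theorem pvAltSum (rows : List (List Bool)) : ∀ (t0 : Int),
    rows.foldl (fun total row =>
        if pvRowSum row ≠ 0 then total + (10 - pvRowSum row) ^ 2 else total) t0
      = t0 + (rows.map (fun row =>
          if pvRowSum row ≠ 0 then (10 - pvRowSum row) ^ 2 else 0)).sum := by
  induction rows with
  | nil => intro t0; simp
  | cons row rest ih =>
    intro t0
    simp only [List.foldl_cons, List.map_cons, List.sum_cons]
    by_cases hc : pvRowSum row ≠ 0
    · rw [if_pos hc, if_pos hc, ih]; ring
    · rw [if_neg hc, if_neg hc, ih]; ring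

-- ===== VERDICT (by name: the statement is the Claim_ definition above) =====
theorem score_rc_spec : Claim_equal_score_rc := by
  intro layed _hdom _hpre
  unfold Spec_score_rc
  simp only [score_rc, score_rc_alt]
  have hgrid : ∀ r ∈ (PySem.List.pyRange 0 20 1).map
      (fun _ => (PySem.List.pyRange 0 10 1).map (fun _ => false)), r.length = 10 := by decide
  set rows := pvPaint layed
    ((PySem.List.pyRange 0 20 1).map (fun _ => (PySem.List.pyRange 0 10 1).map (fun _ => false)))
    with hrows
  obtain ⟨hlen, _h10⟩ := pvPaint_shape layed _ hgrid
  have hlen20 : rows.length = 20 := by rw [← hrows] at hlen; rw [hlen]; decide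
  have hc0 : (PySem.List.pyRange 0 20 1).map (fun _ => (0 : Int))
      = List.replicate rows.length 0 := by rw [hlen20]; decide
  have hcnt : (PySem.List.enumerate rows).foldl (fun c p => pvCount1 c p.1 p.2)
      ((PySem.List.pyRange 0 20 1).map (fun _ => (0 : Int))) = rows.map pvRowSum := by
    rw [hc0]
    have := pvCountAll rows []
    simpa using this
  rw [hcnt]
  set cnt := rows.map pvRowSum with hcntdef
  -- pass 3: the counter multiset becomes its image under (10 - ·)
  have h3 := pvPass3_ms cnt cnt le_rfl
  rw [add_comm (↑cnt : Multiset Int) _] at h3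
  have hms : ((pvPass3 cnt cnt : List Int) : Multiset Int)
      = ↑(cnt.map (fun t => 10 - t)) := add_right_cancel h3
  -- pass 4: sum of squares of the non-10 entries
  have h4 := pvPass4_sum (pvPass3 cnt cnt) (pvPass3 cnt cnt) le_rfl
  rw [h4, pvSumBridge, pvSumOfMs (pvPass3 cnt cnt) (cnt.map (fun t => 10 - t)) hms,
      List.map_map, pvAltSum rows 0, zero_add, hcntdef, List.map_map]
  congr 1
  apply List.map_congr_left
  intro row _hrow
  by_cases hc : pvRowSum row = 0
  · simp [hc]
  · have h10 : ¬ (10 - pvRowSum row = 10) := by omega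
    simp [Function.comp, hc, h10]
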